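-- pv_equiv track=rewrite | github.com/yeoeol/Algo | 프로그래머스/2/12914. 멀리 뛰기/멀리 뛰기.py | solution
-- ===== SOURCE A (Python) =====
-- def solution(n):
--     dp = [0 for _ in range(n+1)]
--     if n == 1:
--         return 1
--     elif n == 2:
--         return 2
--     elif n == 3:
--         return 3
--
--     dp[1] = 1
--     dp[2] = 2
--     dp[3] = 3
--     for i in range(3, n+1):
--         dp[i] = dp[i-1]+dp[i-2]
--
--     return dp[n] % 1234567
-- ===== SOURCE B (Python) =====
-- def solution(n):
--     # Fast-doubling Fibonacci mod 1234567: answer = F(n+1) where F(1)=F(2)=1.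
--     MOD = 1234567
--     def fd(k):
--         # returns (F(k) % MOD, F(k+1) % MOD)
--         if k == 0:
--             return (0, 1)
--         a, b = fd(k >> 1)
--         c = a * (2 * b - a) % MOD
--         d = (a * a + b * b) % MOD
--         if k & 1:
--             return (d, (c + d) % MOD)
--         return (c, d)
--     return fd(n + 1)[0] % MOD
-- ===== Notes on version B (the rewrite author's own statement) =====
-- stated objective: faster
-- what changed: Replaced A's O(n) dp-array loop (and O(n) memory) with recursive fast-doubling Fibonacci computed mod 1234567, keeping intermediate values bounded.
import Mathlib
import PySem

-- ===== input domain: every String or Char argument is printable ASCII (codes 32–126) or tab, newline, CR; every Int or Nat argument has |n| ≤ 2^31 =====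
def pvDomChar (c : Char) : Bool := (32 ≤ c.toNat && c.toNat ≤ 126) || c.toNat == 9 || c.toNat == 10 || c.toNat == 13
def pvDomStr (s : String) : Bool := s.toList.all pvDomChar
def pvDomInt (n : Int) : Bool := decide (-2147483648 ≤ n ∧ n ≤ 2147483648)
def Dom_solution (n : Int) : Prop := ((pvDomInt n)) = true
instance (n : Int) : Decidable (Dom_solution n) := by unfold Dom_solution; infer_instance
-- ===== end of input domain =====

-- B replaces A's O(n) dp-array loop with fast-doubling Fibonacci mod 1234567 (O(log n) arithmetic steps).

-- ===== PORT A =====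
-- one loop iteration: dp[i] = dp[i-1] + dp[i-2]; indices are in range under Pre_ (1 ≤ n),
-- so the total getD/set forms are exact there
def aStep (dp : List Int) (i : Int) : List Int :=
  dp.set i.toNat (dp.getD (i.toNat - 1) 0 + dp.getD (i.toNat - 2) 0)

def solution (n : Int) : Int :=
  let dp := List.replicate ((n + 1).toNat) (0 : Int)
  if n = 1 then 1
  else if n = 2 then 2
  else if n = 3 then 3
  else
    let dp := ((dp.set 1 1).set 2 2).set 3 3
    let dp := (PySem.List.pyRange 3 (n + 1) 1).foldl aStep dp
    PySem.Int.mod (dp.getD n.toNat 0) 1234567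

-- ===== PORT B =====
-- fast doubling: fd k = (F(k) % 1234567, F(k+1) % 1234567), F(0)=0, F(1)=1
def fd (k : Nat) : Int × Int :=
  if h : k = 0 then (0, 1)
  else
    let p := fd (k / 2)
    let a := p.1
    let b := p.2
    let c := PySem.Int.mod (a * (2 * b - a)) 1234567
    let d := PySem.Int.mod (a * a + b * b) 1234567
    if k % 2 = 1 then (d, PySem.Int.mod (c + d) 1234567) else (c, d)
termination_by k
decreasing_by exact Nat.div_lt_self (Nat.pos_of_ne_zero h) (by omega)

def solution_alt (n : Int) : Int :=
  PySem.Int.mod (fd (n + 1).toNat).1 1234567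

-- ===== PRECONDITION & SPEC =====
-- Pre_ excludes n ≤ 0, on which A raises IndexError (dp[1] = 1 on a dp of length ≤ 1).
def Pre_solution (n : Int) : Prop := 1 ≤ n
instance (n : Int) : Decidable (Pre_solution n) := by unfold Pre_solution; infer_instance
def pvWitness_solution : Int := 5

def Spec_solution (n : Int) (out : Int) : Prop := out = solution_alt n
instance (n : Int) (out : Int) : Decidable (Spec_solution n out) := by unfold Spec_solution; infer_instance

-- ===== CLAIM (what is proved, stated in full; the proofs are below) =====
def Claim_equal_solution : Prop := ∀ (n : Int), Dom_solution n → Pre_solution n → Spec_solution n (solution n)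

-- ===== LEMMAS AND PROOFS =====

lemma mod_M (a : Int) : PySem.Int.mod a 1234567 = a % 1234567 :=
  PySem.Int.mod_eq_emod_of_pos (by norm_num)

lemma fib_cast_two_mul (h : Nat) :
    (Nat.fib (2 * h) : Int) = (Nat.fib h : Int) * (2 * (Nat.fib (h+1) : Int) - (Nat.fib h : Int)) := by
  have hle : Nat.fib h ≤ 2 * Nat.fib (h+1) := by
    have := Nat.fib_le_fib_succ (n := h); omega
  rw [Nat.fib_two_mul]
  push_cast [Nat.cast_sub hle]
  ring

lemma fib_cast_two_mul_add_one (h : Nat) :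
    (Nat.fib (2 * h + 1) : Int)
      = (Nat.fib h : Int) * (Nat.fib h : Int) + (Nat.fib (h+1) : Int) * (Nat.fib (h+1) : Int) := by
  rw [Nat.fib_two_mul_add_one]
  push_cast
  ring

lemma fd_eq (k : Nat) : fd k = ((Nat.fib k : Int) % 1234567, (Nat.fib (k + 1) : Int) % 1234567) := by
  induction k using Nat.strong_induction_on with
  | _ k ih =>
    match k with
    | 0 => simp [fd]
    | Nat.succ m =>
      rw [fd]
      have h2 : (m+1)/2 < m+1 := by omega
      rw [ih _ h2]
      simp only [mod_M]
      set h := (m+1)/2 with hh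
      set A := (Nat.fib h : Int) with hA
      set B := (Nat.fib (h+1) : Int) with hB
      have e1 : (A % 1234567) ≡ A [ZMOD (1234567:Int)] := Int.emod_emod_of_dvd A dvd_rfl
      have e2 : (B % 1234567) ≡ B [ZMOD (1234567:Int)] := Int.emod_emod_of_dvd B dvd_rfl
      have hc : A % 1234567 * (2 * (B % 1234567) - A % 1234567) % 1234567
          = (Nat.fib (2*h) : Int) % 1234567 := by
        rw [fib_cast_two_mul, ← hA, ← hB]
        exact e1.mul (((Int.ModEq.refl 2).mul e2).sub e1)
      have hd : (A % 1234567 * (A % 1234567) + B % 1234567 * (B % 1234567)) % 1234567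
          = (Nat.fib (2*h+1) : Int) % 1234567 := by
        rw [fib_cast_two_mul_add_one, ← hA, ← hB]
        exact (e1.mul e1).add (e2.mul e2)
      by_cases hpar : (m+1) % 2 = 1
      · have h2h' : 2 * h = m := by omega
        have hfib : (Nat.fib (m + 2) : Int) = (Nat.fib m : Int) + (Nat.fib (m+1) : Int) := by
          rw [Nat.fib_add_two]; push_cast; ring
        simp only [hpar, if_true, hc, hd, h2h', dif_neg (Nat.succ_ne_zero m),
          Nat.succ_eq_add_one, hfib]
        refine Prod.ext rfl ?_
        conv_rhs => rw [Int.add_emod]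
      · have h2h : 2 * h = m + 1 := by omega
        simp only [hpar, if_false, hc, hd, h2h, dif_neg (Nat.succ_ne_zero m), Nat.succ_eq_add_one]

lemma alt_eq (n : Int) : solution_alt n = (Nat.fib ((n + 1).toNat) : Int) % 1234567 := by
  rw [solution_alt, fd_eq, mod_M]
  exact Int.emod_emod_of_dvd _ dvd_rfl

def dp0 (N : Nat) : List Int := (((List.replicate (N + 1) (0 : Int)).set 1 1).set 2 2).set 3 3

lemma dp0_getElem? (N j : Nat) (hj : j ≤ N) :
    (dp0 N)[j]? = some (if j = 3 then 3 else if j = 2 then 2 else if j = 1 then 1 else 0) := by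
  simp only [dp0, List.getElem?_set, List.length_set, List.length_replicate,
    List.getElem?_replicate]
  split_ifs <;> first | rfl | omega

lemma dp0_length (N : Nat) : (dp0 N).length = N + 1 := by simp [dp0]

lemma dp0_getD (N j : Nat) (hj : j ≤ N) :
    (dp0 N).getD j 0 = (if j = 3 then 3 else if j = 2 then 2 else if j = 1 then 1 else 0) := by
  rw [List.getD_eq_getElem?_getD, dp0_getElem? N j hj, Option.getD_some]

lemma loop_inv (N : Nat) (hN : 4 ≤ N) (t : Nat) (h3 : 3 ≤ t) (ht : t ≤ N) :
    ((PySem.List.pyRange 3 ((t : Int) + 1) 1).foldl aStep (dp0 N)).length = N + 1 ∧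
    ∀ j : Nat, 1 ≤ j → j ≤ t →
      ((PySem.List.pyRange 3 ((t : Int) + 1) 1).foldl aStep (dp0 N)).getD j 0 = (Nat.fib (j + 1) : Int) := by
  induction t, h3 using Nat.le_induction with
  | base =>
    have hc : (((3:Nat) : Int) + 1) = (3 : Int) + 1 := by norm_num
    rw [hc, PySem.List.pyRange_one_singleton]
    simp only [List.foldl_cons, List.foldl_nil, aStep]
    have h3n : ((3:Int)).toNat = 3 := rfl
    rw [h3n]
    have hv : (dp0 N).getD (3 - 1) 0 + (dp0 N).getD (3 - 2) 0 = 3 := by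
      rw [show (3:Nat) - 1 = 2 from rfl, show (3:Nat) - 2 = 1 from rfl,
        dp0_getD N 2 (by omega), dp0_getD N 1 (by omega)]
      norm_num
    rw [hv]
    refine ⟨by simp [dp0_length], ?_⟩
    intro j hj1 hj3
    have hlen : 3 < (dp0 N).length := by rw [dp0_length]; omega
    interval_cases j
    · rw [List.getD_eq_getElem?_getD, List.getElem?_set_ne (by omega),
        dp0_getElem? N 1 (by omega)]
      decide
    · rw [List.getD_eq_getElem?_getD, List.getElem?_set_ne (by omega),
        dp0_getElem? N 2 (by omega)]
      decide
    · rw [List.getD_eq_getElem?_getD, List.getElem?_set_self hlen, Option.getD_some]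
      decide
  | succ t h3 ih =>
    have ih' := ih (by omega)
    set L := (PySem.List.pyRange 3 ((t : Int) + 1) 1).foldl aStep (dp0 N) with hL
    have hr : PySem.List.pyRange 3 (((t+1:Nat) : Int) + 1) 1
        = PySem.List.pyRange 3 ((t : Int) + 1) 1 ++ [(t : Int) + 1] := by
      push_cast
      exact PySem.List.pyRange_one_succ_right (by omega)
    rw [hr, List.foldl_append]
    simp only [List.foldl_cons, List.foldl_nil, ← hL]
    have htn : ((t : Int) + 1).toNat = t + 1 := by omega
    simp only [aStep, htn]
    have hv : L.getD (t + 1 - 1) 0 + L.getD (t + 1 - 2) 0 = (Nat.fib (t + 2) : Int) := by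
      have e1 : t + 1 - 1 = t := by omega
      have e2 : t + 1 - 2 = t - 1 := by omega
      rw [e1, e2, ih'.2 t (by omega) (by omega), ih'.2 (t-1) (by omega) (by omega)]
      have e3 : t - 1 + 1 = t := by omega
      rw [e3, Nat.fib_add_two]
      push_cast; ring
    rw [hv]
    refine ⟨by simp [ih'.1], ?_⟩
    intro j hj1 hjt
    by_cases hje : j = t + 1
    · subst hje
      rw [List.getD_eq_getElem?_getD,
        List.getElem?_set_self (show t + 1 < L.length by rw [ih'.1]; omega), Option.getD_some]
    · rw [List.getD_eq_getElem?_getD, List.getElem?_set_ne (show t + 1 ≠ j by omega),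
        ← List.getD_eq_getElem?_getD]
      exact ih'.2 j hj1 (by omega)

-- ===== VERDICT =====
theorem solution_spec : Claim_equal_solution := by
  intro n _ hpre
  have h1 : (1:Int) ≤ n := hpre
  show solution n = solution_alt n
  have h13 : n = 1 ∨ n = 2 ∨ n = 3 ∨ 4 ≤ n := by omega
  rcases h13 with h | h | h | h
  · subst h; rw [alt_eq]; decide
  · subst h; rw [alt_eq]; decide
  · subst h; rw [alt_eq]; decide
  · have hNn : n.toNat = n := Int.toNat_of_nonneg (by omega)
    set N := n.toNat with hNdef
    have hN : 4 ≤ N := by omega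
    have hn : n = (N : Int) := hNn.symm
    rw [alt_eq]
    have hfin : (n + 1).toNat = N + 1 := by omega
    rw [hfin]
    unfold solution
    rw [if_neg (by omega : ¬ n = 1), if_neg (by omega : ¬ n = 2), if_neg (by omega : ¬ n = 3)]
    have hdp : ((((List.replicate ((n + 1).toNat) (0:Int)).set 1 1).set 2 2).set 3 3) = dp0 N := by
      rw [hfin]; rfl
    rw [hdp, hn, Int.toNat_natCast N]
    dsimp only
    rw [(loop_inv N hN N (by omega) le_rfl).2 N (by omega) le_rfl, mod_M]
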